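-- pv_equiv track=rewrite | github.com/Raul-Jimenez2913/pruebas_gestion_cafeteria | Gestion_cafeteria.py | agregar_bebida
-- ===== SOURCE A (Python) =====
-- def agregar_bebida(entrada):
--     # Elimina espacios en blanco de la entrada
--     entrada = entrada.replace(" ", "")
--
--     # Divide la entrada por la coma para separar el nombre de los tamaños
--     partes = entrada.split(",")
--
--     # Verifica que haya al menos dos partes (nombre y al menos un tamaño)
--     if len(partes) < 2:
--         return False
--
--     # El nombre del artículo debe ser alfabético y tener entre 2 y 15 caracteres
--     nombre_articulo = partes[0]
--     if not nombre_articulo.isalpha() or not (2 <= len(nombre_articulo) <= 15):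
--         return False
--
--     # Extrae y valida los tamaños
--     tamanos = partes[1:]
--
--     # Verifica que haya de 1 a 5 tamaños
--     if not (1 <= len(tamanos) <= 5):
--         return False
--
--     # Convierte tamaños a enteros y verifica que estén en el rango de 1 a 48 y en orden ascendente
--     tamanos_enteros = []
--     ultimo_tamano = 0
--     for tamano in tamanos:
--         if not tamano.isdigit() or not (1 <= int(tamano) <= 48):
--             return False
--         tamano_entero = int(tamano)
--         if tamano_entero <= ultimo_tamano: # Verifica orden ascendente
--             return False
--         ultimo_tamano = tamano_entero
--         tamanos_enteros.append(tamano_entero)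
--
--     # Si todos los controles son pasados, la entrada es válida
--     return True
-- ===== SOURCE B (Python) =====
-- def agregar_bebida(entrada):
--     partes = entrada.replace(" ", "").split(",")
--     nombre, tams = partes[0], partes[1:]
--     if not (nombre.isalpha() and 2 <= len(nombre) <= 15 and 1 <= len(tams) <= 5):
--         return False
--     for t in tams:
--         if not (t.isdigit() and 1 <= int(t) <= 48):
--             return False
--     sizes = [int(t) for t in tams]
--     # strictly ascending  <=>  already in sorted order and free of duplicates
--     return sizes == sorted(sizes) and len(set(sizes)) == len(sizes)
-- ===== Notes on version B (the rewrite author's own statement) =====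
-- stated objective: alternative
-- what changed: A decides strict ascent element-by-element with a running `ultimo_tamano` accumulator inside the validation loop; B separates range validation from ordering and decides ascent by a permutation/dedup argument: the list must equal its own sorted copy and a set built from it must keep the full length.
import Mathlib
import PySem

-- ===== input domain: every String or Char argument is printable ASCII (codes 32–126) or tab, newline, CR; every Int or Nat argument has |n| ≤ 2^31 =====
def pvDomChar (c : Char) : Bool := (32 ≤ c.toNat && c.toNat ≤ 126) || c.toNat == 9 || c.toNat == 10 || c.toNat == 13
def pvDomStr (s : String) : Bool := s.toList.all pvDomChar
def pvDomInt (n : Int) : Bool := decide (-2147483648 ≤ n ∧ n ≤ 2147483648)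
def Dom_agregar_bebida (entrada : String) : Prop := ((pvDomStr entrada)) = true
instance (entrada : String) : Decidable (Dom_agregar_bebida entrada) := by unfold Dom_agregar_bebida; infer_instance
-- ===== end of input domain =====

-- B replaces A's running-accumulator ascent check by a permutation/dedup argument:
-- after a range-validation pass, the sizes are strictly ascending iff the list equals
-- its own sorted copy and a set built from it keeps the full length.

-- ===== PORT A =====
-- A's for-loop over the size tokens: early return False on a bad token, running
-- `ultimo_tamano` for the ascending check, `tamanos_enteros` accumulator (never read).
def agregar_loop (ts : List String) (ultimo : Int) (tamanos_enteros : List Int) : Bool :=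
  match ts with
  | [] => true
  | t :: rest =>
    if !PySem.Str.strIsdigit t
        || !(decide (1 ≤ (PySem.Int.ofStr? t).getD 0) && decide ((PySem.Int.ofStr? t).getD 0 ≤ 48)) then
      false
    else
      let v := (PySem.Int.ofStr? t).getD 0
      if v ≤ ultimo then false
      else agregar_loop rest v (tamanos_enteros ++ [v])

def agregar_bebida (entrada : String) : Bool :=
  let e := PySem.Str.replace entrada " " ""
  let partes := (PySem.Str.split? e ",").getD []
  if PySem.List.len partes < 2 then false
  else
    let nombre := PySem.List.pyGetD partes 0 ""
    if !PySem.Str.strIsalpha nombre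
        || !(decide (2 ≤ PySem.Str.len nombre) && decide (PySem.Str.len nombre ≤ 15)) then false
    else
      let tams := PySem.List.slice partes (some 1) none
      if !(decide (1 ≤ PySem.List.len tams) && decide (PySem.List.len tams ≤ 5)) then false
      else agregar_loop tams 0 []

-- ===== PORT B =====
-- B's range-validation pass: every token a digit string with value in 1..48.
def agregar_validar (ts : List String) : Bool :=
  match ts with
  | [] => true
  | t :: rest =>
    if !(PySem.Str.strIsdigit t && decide (1 ≤ (PySem.Int.ofStr? t).getD 0)
          && decide ((PySem.Int.ofStr? t).getD 0 ≤ 48)) then false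
    else agregar_validar rest

def agregar_bebida_alt (entrada : String) : Bool :=
  let partes := (PySem.Str.split? (PySem.Str.replace entrada " " "") ",").getD []
  let nombre := PySem.List.pyGetD partes 0 ""
  let tams := PySem.List.slice partes (some 1) none
  if !(PySem.Str.strIsalpha nombre && decide (2 ≤ PySem.Str.len nombre)
        && decide (PySem.Str.len nombre ≤ 15)
        && decide (1 ≤ PySem.List.len tams) && decide (PySem.List.len tams ≤ 5)) then false
  else if !agregar_validar tams then false
  else
    let sizes := tams.map (fun t => (PySem.Int.ofStr? t).getD 0)
    decide (sizes = PySem.List.sorted sizes (fun x => x))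
      && decide (PySem.Set.len (PySem.Set.ofList sizes) = PySem.List.len sizes)

-- ===== PRECONDITION & SPEC =====
def Spec_agregar_bebida (entrada : String) (out : Bool) : Prop := out = agregar_bebida_alt entrada
instance (entrada : String) (out : Bool) : Decidable (Spec_agregar_bebida entrada out) := by unfold Spec_agregar_bebida; infer_instance

-- ===== CLAIM (what is proved, stated in full; the proofs are below) =====
def Claim_equal_agregar_bebida : Prop := ∀ (entrada : String), Dom_agregar_bebida entrada → Spec_agregar_bebida entrada (agregar_bebida entrada)

-- ===== LEMMAS AND PROOFS =====

-- strict ascent of the list starting from lower bound u (A's running `ultimo` check)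
def pvChain (u : Int) : List Int → Bool
  | [] => true
  | x :: xs => decide (u < x) && pvChain x xs

theorem pvChain_iff (xs : List Int) (u : Int) :
    pvChain u xs = true ↔ List.Pairwise (· < ·) (u :: xs) := by
  induction xs generalizing u with
  | nil => simp [pvChain]
  | cons x xs ih =>
    rw [pvChain, Bool.and_eq_true, decide_eq_true_eq, ih]
    constructor
    · rintro ⟨hux, hp⟩
      rw [List.pairwise_cons]
      refine ⟨fun y hy => ?_, hp⟩
      rcases List.mem_cons.mp hy with rfl | hy
      · exact hux
      · exact lt_trans hux ((List.pairwise_cons.mp hp).1 y hy)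
    · intro hp
      rw [List.pairwise_cons] at hp
      exact ⟨hp.1 x (List.mem_cons_self ..), hp.2⟩

-- A's loop = B's validation pass && the ascent check on the converted values
theorem pvLoop_eq (ts : List String) (u : Int) (acc : List Int) :
    agregar_loop ts u acc =
      (agregar_validar ts && pvChain u (ts.map (fun t => (PySem.Int.ofStr? t).getD 0))) := by
  induction ts generalizing u acc with
  | nil => simp [agregar_loop, agregar_validar, pvChain]
  | cons t rest ih =>
    simp only [agregar_loop, agregar_validar, List.map_cons, pvChain]
    cases hd : PySem.Str.strIsdigit t with
    | false => simp
    | true =>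
      simp only [Bool.true_and, Bool.not_true, Bool.false_or]
      cases hr : (decide (1 ≤ (PySem.Int.ofStr? t).getD 0) && decide ((PySem.Int.ofStr? t).getD 0 ≤ 48)) with
      | false => simp
      | true =>
        simp only [Bool.not_true, Bool.false_eq_true, if_false]
        split_ifs with hu
        · have : decide (u < (PySem.Int.ofStr? t).getD 0) = false := decide_eq_false (by omega)
          simp [this]
        · rw [ih]
          have : decide (u < (PySem.Int.ofStr? t).getD 0) = true := decide_eq_true (by omega)
          simp [this]

-- every value that survives B's validation pass is ≥ 1
theorem pvValidar_pos (ts : List String) (h : agregar_validar ts = true) :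
    ∀ t ∈ ts, 1 ≤ (PySem.Int.ofStr? t).getD 0 := by
  induction ts with
  | nil => intro t ht; cases ht
  | cons t rest ih =>
    cases hg : (PySem.Str.strIsdigit t && decide (1 ≤ (PySem.Int.ofStr? t).getD 0)
        && decide ((PySem.Int.ofStr? t).getD 0 ≤ 48)) with
    | false =>
      rw [agregar_validar, if_pos (by rw [hg]; rfl)] at h
      cases h
    | true =>
      rw [agregar_validar, if_neg (by rw [hg]; simp)] at h
      intro s hs
      rcases List.mem_cons.mp hs with rfl | hs
      · simp only [Bool.and_eq_true, decide_eq_true_eq] at hg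
        exact hg.1.2
      · exact ih h s hs

-- length of a Set.add step
theorem pvLen_add (s : List Int) (x : Int) :
    (PySem.Set.add s x).length = if x ∈ s then s.length else s.length + 1 := by
  simp only [PySem.Set.add]
  by_cases hx : x ∈ s
  · rw [if_pos ((PySem.Set.contains_iff s x).mpr hx), if_pos hx]
  · rw [if_neg (fun hc => hx ((PySem.Set.contains_iff s x).mp hc)), if_neg hx]
    simp

theorem pvFoldl_add_le (xs : List Int) (s : List Int) :
    (xs.foldl PySem.Set.add s).length ≤ s.length + xs.length := by
  induction xs generalizing s with
  | nil => simp
  | cons x xs ih =>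
    rw [List.foldl_cons]
    have := ih (PySem.Set.add s x)
    rw [pvLen_add] at this
    split_ifs at this <;> simp only [List.length_cons] <;> omega

theorem pvFoldl_add_len (xs : List Int) (s : List Int) :
    (xs.foldl PySem.Set.add s).length = s.length + xs.length ↔
      (xs.Nodup ∧ ∀ x ∈ xs, x ∉ s) := by
  induction xs generalizing s with
  | nil => simp
  | cons x xs ih =>
    rw [List.foldl_cons]
    by_cases hx : x ∈ s
    · have hadd : PySem.Set.add s x = s := by
        simp only [PySem.Set.add]
        rw [if_pos ((PySem.Set.contains_iff s x).mpr hx)]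
      rw [hadd]
      constructor
      · intro h
        have := pvFoldl_add_le xs s
        simp only [List.length_cons] at h
        omega
      · rintro ⟨-, hall⟩
        exact absurd hx (hall x (List.mem_cons_self ..))
    · have hadd : PySem.Set.add s x = s ++ [x] := by
        simp only [PySem.Set.add]
        rw [if_neg (fun hc => hx ((PySem.Set.contains_iff s x).mp hc))]
      rw [hadd]
      constructor
      · intro h
        have h' : (List.foldl PySem.Set.add (s ++ [x]) xs).length = (s ++ [x]).length + xs.length := by
          simp only [List.length_append, List.length_cons, List.length_nil] at h ⊢
          omega
        obtain ⟨hnd, hall⟩ := (ih (s ++ [x])).mp h'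
        refine ⟨List.nodup_cons.mpr ⟨fun hxm => ?_, hnd⟩, fun y hy => ?_⟩
        · exact hall x hxm (List.mem_append.mpr (Or.inr (List.mem_singleton.mpr rfl)))
        · rcases List.mem_cons.mp hy with rfl | hy
          · exact hx
          · exact fun hys => hall y hy (List.mem_append.mpr (Or.inl hys))
      · rintro ⟨hnd, hall⟩
        rw [List.nodup_cons] at hnd
        have hnots : ∀ y ∈ xs, y ∉ s ++ [x] := by
          intro y hy hmem
          rcases List.mem_append.mp hmem with hys | hyx
          · exact hall y (List.mem_cons_of_mem _ hy) hys
          · exact hnd.1 ((List.mem_singleton.mp hyx) ▸ hy)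
        have h' := (ih (s ++ [x])).mpr ⟨hnd.2, hnots⟩
        simp only [List.length_append, List.length_cons, List.length_nil] at h' ⊢
        omega

theorem pvOfList_len_iff (xs : List Int) :
    (PySem.Set.len (PySem.Set.ofList xs) = PySem.List.len xs) ↔ xs.Nodup := by
  rw [PySem.Set.ofList_eq_foldl]
  show ((List.foldl PySem.Set.add [] xs).length : Int) = (xs.length : Int) ↔ _
  rw [Int.natCast_inj]
  have := pvFoldl_add_len xs []
  simp only [List.length_nil, Nat.zero_add, List.not_mem_nil, not_false_iff,
    implies_true, and_true] at this
  exact this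

-- Pairwise (<) ↔ sorted-in-place ∧ no duplicates
theorem pvPairwise_lt_iff (xs : List Int) :
    List.Pairwise (· < ·) xs ↔
      (xs = PySem.List.sorted xs (fun x => x) ∧ xs.Nodup) := by
  constructor
  · intro h
    refine ⟨(PySem.List.sorted_eq_of_perm_of_pairwise_lt xs xs (fun x => x)
      (List.Perm.refl xs) h).symm, h.imp (fun hab => ne_of_lt hab)⟩
  · rintro ⟨hs, hnd⟩
    have hle : List.Pairwise (fun a b : Int => a ≤ b) xs := by
      rw [hs]; exact PySem.List.sorted_pairwise xs (fun x => x)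
    exact (hle.and hnd).imp (fun hab => lt_of_le_of_ne hab.1 hab.2)

-- under a successful validation pass, A's ascent check = B's sorted/set check
theorem pvChain_eq_checks (ts : List String) (hv : agregar_validar ts = true) :
    pvChain 0 (ts.map (fun t => (PySem.Int.ofStr? t).getD 0)) =
      (decide ((ts.map (fun t => (PySem.Int.ofStr? t).getD 0)) =
          PySem.List.sorted (ts.map (fun t => (PySem.Int.ofStr? t).getD 0)) (fun x => x))
        && decide (PySem.Set.len (PySem.Set.ofList (ts.map (fun t => (PySem.Int.ofStr? t).getD 0)))
            = PySem.List.len (ts.map (fun t => (PySem.Int.ofStr? t).getD 0)))) := by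
  set sizes := ts.map (fun t => (PySem.Int.ofStr? t).getD 0) with hsz
  rw [Bool.eq_iff_iff, pvChain_iff, List.pairwise_cons, Bool.and_eq_true,
    decide_eq_true_eq, decide_eq_true_eq, pvOfList_len_iff]
  constructor
  · rintro ⟨-, h⟩
    exact (pvPairwise_lt_iff sizes).mp h
  · intro h
    refine ⟨fun y hy => ?_, (pvPairwise_lt_iff sizes).mpr h⟩
    rw [hsz] at hy
    rcases List.mem_map.mp hy with ⟨t, ht, rfl⟩
    have := pvValidar_pos ts hv t ht
    omega

-- ===== VERDICT (by name: the statement is the Claim_ definition above) =====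
theorem agregar_bebida_spec : Claim_equal_agregar_bebida := by
  intro entrada _
  show agregar_bebida entrada = agregar_bebida_alt entrada
  rw [agregar_bebida, agregar_bebida_alt]
  generalize (PySem.Str.split? (PySem.Str.replace entrada " " "") ",").getD [] = partes
  cases partes with
  | nil => simp [PySem.List.len]
  | cons nombre tams =>
    simp only [PySem.List.len_eq, PySem.List.pyGetD_zero_cons, PySem.List.slice_from_one,
      List.tail_cons, List.length_cons]
    cases hlo : decide ((1:Int) ≤ (tams.length : Int)) with
    | false =>
      have h0 : tams.length = 0 := by have := of_decide_eq_false hlo; omega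
      have hlt : ((tams.length + 1 : Nat) : Int) < 2 := by rw [h0]; decide
      rw [if_pos hlt, if_pos (by simp)]
    | true =>
      have hge : ¬ (((tams.length + 1 : Nat) : Int) < 2) := by
        have := of_decide_eq_true hlo; push_cast at *; omega
      rw [if_neg hge]
      cases hA : PySem.Str.strIsalpha nombre with
      | false => simp
      | true =>
        cases h2 : decide (2 ≤ PySem.Str.len nombre) with
        | false => simp
        | true =>
          cases h15 : decide (PySem.Str.len nombre ≤ 15) with
          | false => simp
          | true =>
            cases hhi : decide ((tams.length : Int) ≤ 5) with
            | false => simp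
            | true =>
              simp only [Bool.and_self, Bool.not_true, Bool.false_eq_true, if_false]
              rw [pvLoop_eq]
              cases hv : agregar_validar tams with
              | false => simp
              | true =>
                simp only [Bool.not_true, Bool.false_eq_true, if_false, Bool.true_and]
                exact pvChain_eq_checks tams hv
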